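-- pv_equiv track=rewrite | github.com/courtzexe/school-projects | cle33_202_PA3.py | years_to_rule
-- ===== SOURCE A (Python) =====
-- def years_to_rule(n1, n2, n3):
--     result = 0 #initialize variable
--     for i in range(n1): #calls each int from 0 to n1
--         i += 1 #has the range start from 1 instead of 0
--         for num in range(n2): #calls each int from 0 to n2
--             num += 1 #range starts from 1
--             product = i * num #multiplies int with num
--             quotient = product // n3 #integer divides product
--             result += quotient #adds all quotients together
--     return result
-- ===== SOURCE B (Python) =====
-- def _floor_sum(n, m, a, b):
--     """sum of (a*j + b)//m for j in range(n); requires m > 0."""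
--     if n <= 0:
--         return 0
--     qa, ra = divmod(a, m)
--     qb, rb = divmod(b, m)
--     total = qa * (n * (n - 1) // 2) + qb * n
--     t = ra * n + rb
--     if t < m:
--         return total
--     return total + _floor_sum(t // m, ra, m, t % m)
--
--
-- def years_to_rule(n1, n2, n3):
--     # Euclidean-like floor_sum per row: O(n1 * log n3) instead of A's O(n1 * n2).
--     if n2 < 1:
--         return 0
--     if n3 > 0:
--         m, s = n3, 1
--     else:
--         m, s = -n3, -1  # (i*j)//n3 == (-i*j)//(-n3)
--     total = 0
--     for i in range(1, n1 + 1):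
--         total += _floor_sum(n2 + 1, m, s * i, 0)
--     return total
-- ===== Notes on version B (the rewrite author's own statement) =====
-- stated objective: faster
-- what changed: Replaces the O(n1*n2) double loop by a per-row Euclidean-like floor_sum recursion that evaluates sum_j floor(i*j/n3) in O(log n3) per row.
import Mathlib
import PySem

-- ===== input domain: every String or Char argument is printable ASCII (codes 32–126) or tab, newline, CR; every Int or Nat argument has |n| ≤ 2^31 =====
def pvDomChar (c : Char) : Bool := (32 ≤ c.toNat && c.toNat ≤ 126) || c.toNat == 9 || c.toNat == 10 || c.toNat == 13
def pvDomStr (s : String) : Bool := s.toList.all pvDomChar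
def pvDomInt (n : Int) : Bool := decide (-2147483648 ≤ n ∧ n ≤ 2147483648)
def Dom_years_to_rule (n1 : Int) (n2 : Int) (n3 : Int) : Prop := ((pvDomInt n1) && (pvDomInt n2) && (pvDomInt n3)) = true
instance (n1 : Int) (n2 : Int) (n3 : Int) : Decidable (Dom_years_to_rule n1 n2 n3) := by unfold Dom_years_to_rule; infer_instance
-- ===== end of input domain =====

-- B replaces A's O(n1*n2) double loop by a per-row Euclidean-like floor_sum recursion; measurably faster.


-- ===== PORT A =====
def years_to_rule (n1 : Int) (n2 : Int) (n3 : Int) : Int :=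
  (PySem.List.pyRange 0 n1 1).foldl (fun result i0 =>
    let i := i0 + 1
    (PySem.List.pyRange 0 n2 1).foldl (fun result num0 =>
      let num := num0 + 1
      let product := i * num
      let quotient := PySem.Int.floordiv product n3
      result + quotient) result) 0

-- ===== PORT B =====
-- port of Source B's _floor_sum; the 'm ≤ 0' guard only makes the recursion total
-- (the Python precondition is m > 0 and it is never called otherwise).
def floorSumAux (n : Int) (m : Int) (a : Int) (b : Int) : Int :=
  if m ≤ 0 then 0
  else if n ≤ 0 then 0
  else
    let qa := PySem.Int.floordiv a m
    let ra := PySem.Int.mod a m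
    let qb := PySem.Int.floordiv b m
    let rb := PySem.Int.mod b m
    let total := qa * (PySem.Int.floordiv (n * (n - 1)) 2) + qb * n
    let t := ra * n + rb
    if t < m then total
    else total + floorSumAux (PySem.Int.floordiv t m) ra m (PySem.Int.mod t m)
termination_by m.natAbs
decreasing_by
  have h1 : 0 ≤ PySem.Int.mod a m := PySem.Int.mod_nonneg a (by omega)
  have h2 : PySem.Int.mod a m < m := PySem.Int.mod_lt a (by omega)
  omega

def years_to_rule_alt (n1 : Int) (n2 : Int) (n3 : Int) : Int :=
  if n2 < 1 then 0
  else
    let ms := if n3 > 0 then (n3, (1 : Int)) else (-n3, (-1 : Int))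
    (PySem.List.pyRange 1 (n1 + 1) 1).foldl
      (fun total i => total + floorSumAux (n2 + 1) ms.1 (ms.2 * i) 0) 0

-- ===== PRECONDITION & SPEC =====
-- Pre_ excludes exactly the inputs where Python A raises ZeroDivisionError
-- (n3 = 0 with both loops nonempty); Python B raises there too.
def Pre_years_to_rule (n1 : Int) (n2 : Int) (n3 : Int) : Prop := n3 ≠ 0 ∨ n1 < 1 ∨ n2 < 1
instance (n1 : Int) (n2 : Int) (n3 : Int) : Decidable (Pre_years_to_rule n1 n2 n3) := by unfold Pre_years_to_rule; infer_instance
def pvWitness_years_to_rule : Int × Int × Int := (3, 4, 5)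

def Spec_years_to_rule (n1 : Int) (n2 : Int) (n3 : Int) (out : Int) : Prop := out = years_to_rule_alt n1 n2 n3
instance (n1 : Int) (n2 : Int) (n3 : Int) (out : Int) : Decidable (Spec_years_to_rule n1 n2 n3 out) := by unfold Spec_years_to_rule; infer_instance

-- ===== CLAIM (what is proved, stated in full; the proofs are below) =====
def Claim_equal_years_to_rule : Prop := ∀ (n1 : Int) (n2 : Int) (n3 : Int), Dom_years_to_rule n1 n2 n3 → Pre_years_to_rule n1 n2 n3 → Spec_years_to_rule n1 n2 n3 (years_to_rule n1 n2 n3)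

-- ===== LEMMAS AND PROOFS =====

-- counting helper: #{k < K : k < D} = D
lemma pv_sum_ite_lt (K : ℕ) (D : Int) (h0 : 0 ≤ D) (hK : D ≤ (K : Int)) :
    (∑ k ∈ Finset.range K, (if (k : Int) < D then (1 : Int) else 0)) = D := by
  induction K with
  | zero => simp at hK ⊢; omega
  | succ K ih =>
    rw [Finset.sum_range_succ]
    by_cases h : D ≤ (K : Int)
    · rw [ih h]; rw [if_neg (by omega)]; ring
    · have hD : D = (K : Int) + 1 := by push_cast at hK ⊢; omega
      rw [if_pos (by omega)]
      have : (∑ k ∈ Finset.range K, (if (k : Int) < D then (1 : Int) else 0))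
          = ∑ k ∈ Finset.range K, (1 : Int) := by
        apply Finset.sum_congr rfl
        intro k hk
        rw [Finset.mem_range] at hk
        rw [if_pos (by omega)]
      rw [this]; simp; omega

-- counting helper: #{j < N : D ≤ j} = N - D
lemma pv_sum_ite_ge (N : ℕ) (D : Int) (h0 : 0 ≤ D) (hN : D ≤ (N : Int)) :
    (∑ j ∈ Finset.range N, (if D ≤ (j : Int) then (1 : Int) else 0)) = (N : Int) - D := by
  induction N with
  | zero => simp at hN ⊢; omega
  | succ N ih =>
    rw [Finset.sum_range_succ]
    by_cases h : D ≤ (N : Int)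
    · rw [ih h, if_pos h]; push_cast; ring
    · have hD : D = (N : Int) + 1 := by push_cast at hN ⊢; omega
      rw [if_neg (by omega)]
      have : (∑ j ∈ Finset.range N, (if D ≤ (j : Int) then (1 : Int) else 0))
          = ∑ j ∈ Finset.range N, (0 : Int) := by
        apply Finset.sum_congr rfl
        intro j hj
        rw [Finset.mem_range] at hj
        rw [if_neg (by omega)]
      rw [this]; simp; omega

-- Gauss sum over Finset.range, in ℤ with ediv
lemma pv_gauss (n : Int) (hn : 0 ≤ n) :
    (∑ j ∈ Finset.range n.toNat, (j : Int)) = n * (n - 1) / 2 := by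
  by_cases h0 : n = 0
  · subst h0; simp
  · have h1 : 1 ≤ n.toNat := by omega
    have h := Finset.sum_range_id_mul_two n.toNat
    have hn' : (n.toNat : Int) = n := Int.toNat_of_nonneg hn
    have h2 : (∑ j ∈ Finset.range n.toNat, (j : Int)) * 2 = n * (n - 1) := by
      have := congrArg (Nat.cast : ℕ → ℤ) h
      push_cast [Nat.cast_sub h1] at this
      rw [hn'] at this
      linarith [this]
    omega

-- the Euclidean swap: double counting of {(j,k) : m*(k+1) ≤ a*j + b}
lemma pv_swap (m a b n : Int) (hm : 0 < m) (ha : 0 < a) (hb : 0 ≤ b) (hbm : b < m)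
    (hn : 1 ≤ n) :
    (∑ j ∈ Finset.range n.toNat, (a * j + b) / m)
      = ∑ k ∈ Finset.range ((a * n + b) / m).toNat, (m * k + (a * n + b) % m) / a := by
  set t := a * n + b with ht
  set Y := t / m with hY
  set B := t % m with hB
  have ht0 : 0 < t := by nlinarith
  have hY0 : 0 ≤ Y := Int.ediv_nonneg ht0.le hm.le
  have hB0 : 0 ≤ B := Int.emod_nonneg t (by omega)
  have hBm : B < m := Int.emod_lt_of_pos t hm
  have htYB : m * Y + B = t := Int.mul_ediv_add_emod t m
  have hKY : (Y.toNat : Int) = Y := Int.toNat_of_nonneg hY0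
  have hN : ((n.toNat : Int)) = n := Int.toNat_of_nonneg (by omega)
  have stepA : ∀ j ∈ Finset.range n.toNat,
      (a * j + b) / m
        = ∑ k ∈ Finset.range Y.toNat, (if m * ((k : Int) + 1) ≤ a * j + b then (1 : Int) else 0) := by
    intro j hj
    rw [Finset.mem_range] at hj
    have hj' : (j : Int) ≤ n := by omega
    have hD0 : 0 ≤ (a * j + b) / m := Int.ediv_nonneg (by positivity) hm.le
    have hDY : (a * j + b) / m ≤ Y := Int.ediv_le_ediv hm (by nlinarith)
    have hiff : ∀ k : ℕ, (m * ((k : Int) + 1) ≤ a * j + b) ↔ ((k : Int) < (a * j + b) / m) := by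
      intro k
      rw [show ((k : Int) < (a * j + b) / m) ↔ ((k : Int) + 1 ≤ (a * j + b) / m) by omega,
          Int.le_ediv_iff_mul_le hm]
      constructor <;> intro h <;> nlinarith
    calc (a * j + b) / m
        = ∑ k ∈ Finset.range Y.toNat, (if (k : Int) < (a * j + b) / m then (1 : Int) else 0) := by
          rw [pv_sum_ite_lt Y.toNat _ hD0 (by omega)]
      _ = _ := by
          apply Finset.sum_congr rfl; intro k _
          rw [if_congr (hiff k).symm rfl rfl]
  have stepC : ∀ k ∈ Finset.range Y.toNat,
      (∑ j ∈ Finset.range n.toNat, (if m * ((k : Int) + 1) ≤ a * j + b then (1 : Int) else 0))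
        = (m * (Y - 1 - (k : Int)) + B) / a := by
    intro k hk
    rw [Finset.mem_range] at hk
    have hkY : (k : Int) ≤ Y - 1 := by omega
    set W := m * (Y - 1 - (k : Int)) + B with hW
    have hWt : W = t - m * ((k : Int) + 1) := by rw [hW, ← htYB]; ring
    have hW0 : 0 ≤ W := by nlinarith
    set c := W / a with hc
    have hc0 : 0 ≤ c := Int.ediv_nonneg hW0 ha.le
    have hcn : c < n := by
      rw [hc, Int.ediv_lt_iff_lt_mul ha]
      nlinarith
    have hcond : ∀ j : ℕ, (m * ((k : Int) + 1) ≤ a * j + b) ↔ (n - c ≤ (j : Int)) := by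
      intro j
      have h1 : (n - (j : Int) ≤ c) ↔ (n - (j : Int)) * a ≤ W := Int.le_ediv_iff_mul_le ha
      rw [show (n - c ≤ (j : Int)) ↔ (n - (j : Int) ≤ c) by omega, h1]
      rw [hWt, ht]
      constructor <;> intro h <;> nlinarith
    calc (∑ j ∈ Finset.range n.toNat, (if m * ((k : Int) + 1) ≤ a * j + b then (1 : Int) else 0))
        = ∑ j ∈ Finset.range n.toNat, (if n - c ≤ (j : Int) then (1 : Int) else 0) := by
          apply Finset.sum_congr rfl; intro j _
          rw [if_congr (hcond j) rfl rfl]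
      _ = (n.toNat : Int) - (n - c) := pv_sum_ite_ge n.toNat (n - c) (by omega) (by omega)
      _ = c := by omega
  calc (∑ j ∈ Finset.range n.toNat, (a * j + b) / m)
      = ∑ j ∈ Finset.range n.toNat, ∑ k ∈ Finset.range Y.toNat,
          (if m * ((k : Int) + 1) ≤ a * j + b then (1 : Int) else 0) := Finset.sum_congr rfl stepA
    _ = ∑ k ∈ Finset.range Y.toNat, ∑ j ∈ Finset.range n.toNat,
          (if m * ((k : Int) + 1) ≤ a * j + b then (1 : Int) else 0) := Finset.sum_comm
    _ = ∑ k ∈ Finset.range Y.toNat, (m * (Y - 1 - (k : Int)) + B) / a := Finset.sum_congr rfl stepC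
    _ = ∑ k ∈ Finset.range Y.toNat, (m * ((Y.toNat - 1 - k : ℕ) : Int) + B) / a := by
        apply Finset.sum_congr rfl; intro k hk
        rw [Finset.mem_range] at hk
        have hcast : ((Y.toNat - 1 - k : ℕ) : Int) = Y - 1 - (k : Int) := by omega
        rw [hcast]
    _ = ∑ k ∈ Finset.range Y.toNat, (m * (k : Int) + B) / a :=
        Finset.sum_range_reflect (fun k : ℕ => (m * (k : Int) + B) / a) Y.toNat

-- floorSumAux computes the floor sum, for m > 0 (strong induction on m)
lemma floorSumAux_eq : ∀ (M : ℕ) (m : Int), m.natAbs = M → 0 < m → ∀ (n a b : Int),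
    floorSumAux n m a b = ∑ j ∈ Finset.range n.toNat, (a * j + b) / m := by
  intro M
  induction M using Nat.strong_induction_on with
  | _ M ih =>
    intro m hM hm n a b
    rw [floorSumAux]
    rw [if_neg (by omega : ¬ m ≤ 0)]
    by_cases hn : n ≤ 0
    · rw [if_pos hn]
      have : n.toNat = 0 := by omega
      simp [this]
    · rw [if_neg hn]
      simp only [PySem.Int.floordiv_eq_ediv_of_pos hm, PySem.Int.mod_eq_emod_of_pos hm,
        PySem.Int.floordiv_eq_ediv_of_pos (show (0:Int) < 2 by norm_num)]
      set qa := a / m with hqa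
      set ra := a % m with hra
      set qb := b / m with hqb
      set rb := b % m with hrb
      have hra0 : 0 ≤ ra := Int.emod_nonneg a (by omega)
      have hram : ra < m := Int.emod_lt_of_pos a hm
      have hrb0 : 0 ≤ rb := Int.emod_nonneg b (by omega)
      have hrbm : rb < m := Int.emod_lt_of_pos b hm
      have hsplit : (∑ j ∈ Finset.range n.toNat, (a * j + b) / m)
          = qa * (n * (n - 1) / 2) + qb * n + ∑ j ∈ Finset.range n.toNat, (ra * j + rb) / m := by
        have per : ∀ j : ℕ, (a * (j:Int) + b) / m = (ra * j + rb) / m + (qa * j + qb) := by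
          intro j
          have h1 : a * (j:Int) + b = (ra * j + rb) + (qa * j + qb) * m := by
            have h2 : m * qa + ra = a := Int.mul_ediv_add_emod a m
            have h3 : m * qb + rb = b := Int.mul_ediv_add_emod b m
            nlinarith [h2, h3]
          rw [h1, Int.add_mul_ediv_right _ _ (by omega : m ≠ 0)]
        rw [Finset.sum_congr rfl (fun j _ => per j), Finset.sum_add_distrib]
        have hsum2 : (∑ j ∈ Finset.range n.toNat, (qa * (j:Int) + qb))
            = qa * (n * (n - 1) / 2) + qb * n := by
          rw [Finset.sum_add_distrib, ← Finset.mul_sum, pv_gauss n (by omega),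
            Finset.sum_const, Finset.card_range]
          have hc : ((n.toNat : Int)) = n := by omega
          simp [hc]
          ring
        rw [hsum2]; ring
      by_cases ht : ra * n + rb < m
      · rw [if_pos ht]
        have hz : ∀ j ∈ Finset.range n.toNat, (ra * (j:Int) + rb) / m = 0 := by
          intro j hj
          rw [Finset.mem_range] at hj
          have hj' : (j : Int) ≤ n - 1 := by omega
          apply Int.ediv_eq_zero_of_lt (by positivity)
          nlinarith
        rw [hsplit, Finset.sum_congr rfl hz]
        simp
      · rw [if_neg ht]
        have hra1 : 0 < ra := by
          rcases lt_or_eq_of_le hra0 with h | h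
          · exact h
          · exfalso; rw [← h] at ht; simp at ht; omega
        have hswap := pv_swap m ra rb n hm hra1 hrb0 hrbm (by omega)
        have hih := ih ra.natAbs (by omega) ra rfl hra1 ((ra * n + rb) / m) m ((ra * n + rb) % m)
        rw [hsplit, hswap, ← hih]

-- bridge: List.range sums are Finset.range sums
lemma pv_list_sum (N : ℕ) (f : ℕ → ℤ) :
    ((List.range N).map f).sum = ∑ j ∈ Finset.range N, f j := by
  induction N with
  | zero => simp
  | succ N ih => rw [List.range_succ, Finset.sum_range_succ, List.map_append, List.sum_append, ih]; simp

-- A as a double Finset sum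
lemma pv_A_eq (n1 n2 n3 : Int) :
    years_to_rule n1 n2 n3
      = ∑ k ∈ Finset.range n1.toNat, ∑ j ∈ Finset.range n2.toNat,
          PySem.Int.floordiv (((k : Int) + 1) * ((j : Int) + 1)) n3 := by
  unfold years_to_rule
  rw [PySem.List.pyRange_one 0 n1, List.foldl_map,
    show ((n1 - 0).toNat) = n1.toNat by omega]
  have hinner : ∀ (i0 : Int) (acc : Int),
      (PySem.List.pyRange 0 n2 1).foldl (fun result num0 =>
        result + PySem.Int.floordiv ((i0 + 1) * (num0 + 1)) n3) acc
        = acc + ∑ j ∈ Finset.range n2.toNat, PySem.Int.floordiv ((i0 + 1) * ((j:Int) + 1)) n3 := by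
    intro i0 acc
    rw [PySem.List.pyRange_one 0 n2, List.foldl_map,
      show ((n2 - 0).toNat) = n2.toNat by omega,
      PySem.List.foldl_add (List.range n2.toNat)
        (fun y : ℕ => PySem.Int.floordiv ((i0 + 1) * (0 + (y:Int) + 1)) n3) acc]
    congr 1
    rw [pv_list_sum n2.toNat (fun y : ℕ => PySem.Int.floordiv ((i0 + 1) * (0 + (y:Int) + 1)) n3)]
    apply Finset.sum_congr rfl
    intro j _
    norm_num
  simp only [hinner]
  rw [PySem.List.foldl_add (List.range n1.toNat)
    (fun y : ℕ => ∑ j ∈ Finset.range n2.toNat,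
      PySem.Int.floordiv ((0 + (y:Int) + 1) * ((j:Int) + 1)) n3) 0]
  rw [pv_list_sum n1.toNat (fun y : ℕ => ∑ j ∈ Finset.range n2.toNat,
    PySem.Int.floordiv ((0 + (y:Int) + 1) * ((j:Int) + 1)) n3)]
  rw [zero_add]
  apply Finset.sum_congr rfl
  intro k _
  apply Finset.sum_congr rfl
  intro j _
  norm_num

-- B as a Finset sum of floorSumAux rows
lemma pv_B_eq (n1 n2 n3 : Int) (hn2 : ¬ n2 < 1) (m s : Int)
    (hms : (if n3 > 0 then ((n3, (1:Int)) : Int × Int) else (-n3, -1)) = (m, s)) :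
    years_to_rule_alt n1 n2 n3
      = ∑ k ∈ Finset.range n1.toNat, floorSumAux (n2 + 1) m (s * (1 + (k : Int))) 0 := by
  unfold years_to_rule_alt
  rw [if_neg hn2]
  simp only [hms]
  rw [PySem.List.pyRange_one 1 (n1 + 1), List.foldl_map,
    show ((n1 + 1 - 1).toNat) = n1.toNat by omega,
    PySem.List.foldl_add (List.range n1.toNat)
      (fun y : ℕ => floorSumAux (n2 + 1) (m, s).1 ((m, s).2 * (1 + (y : Int))) 0) 0,
    pv_list_sum n1.toNat (fun y : ℕ => floorSumAux (n2 + 1) (m, s).1 ((m, s).2 * (1 + (y : Int))) 0),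
    zero_add]

-- one row of B, as the corresponding Finset sum (shifting away the j = 0 term)
lemma pv_row (n2 c m : Int) (hm : 0 < m) (hn2 : 0 ≤ n2) :
    floorSumAux (n2 + 1) m c 0 = ∑ j ∈ Finset.range n2.toNat, (c * ((j : Int) + 1)) / m := by
  rw [floorSumAux_eq m.natAbs m rfl hm]
  rw [show ((n2 + 1).toNat) = n2.toNat + 1 by omega]
  rw [Finset.sum_range_succ' (fun j : ℕ => (c * (j : Int) + 0) / m) n2.toNat]
  simp only [Nat.cast_zero, mul_zero, add_zero, Int.zero_ediv]
  apply Finset.sum_congr rfl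
  intro j _
  push_cast
  ring_nf

-- A's inner loop being empty makes A return 0
lemma pv_A_zero_of_n2 (n1 n2 n3 : Int) (hn2 : n2 < 1) : years_to_rule n1 n2 n3 = 0 := by
  rw [pv_A_eq]
  have : n2.toNat = 0 := by omega
  simp [this]

-- ===== VERDICT (by name: the statement is the Claim_ definition above) =====
theorem years_to_rule_spec : Claim_equal_years_to_rule := by
  intro n1 n2 n3 _ hpre
  unfold Spec_years_to_rule
  by_cases hn2 : n2 < 1
  · rw [pv_A_zero_of_n2 n1 n2 n3 hn2]
    unfold years_to_rule_alt
    rw [if_pos hn2]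
  · have hn2' : 0 ≤ n2 := by omega
    by_cases h3 : n3 > 0
    · rw [pv_A_eq, pv_B_eq n1 n2 n3 hn2 n3 1 (by rw [if_pos h3])]
      apply Finset.sum_congr rfl
      intro k _
      rw [pv_row n2 (1 * (1 + (k : Int))) n3 h3 hn2']
      apply Finset.sum_congr rfl
      intro j _
      rw [PySem.Int.floordiv_eq_ediv_of_pos h3]
      congr 1
      ring
    · by_cases h30 : n3 = 0
      · have hn1 : n1 < 1 := by
          rcases hpre with h | h | h
          · exact absurd h30 h
          · exact h
          · omega
        rw [pv_A_eq, pv_B_eq n1 n2 n3 hn2 (-n3) (-1) (by rw [if_neg h3])]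
        have : n1.toNat = 0 := by omega
        simp [this]
      · have hm : 0 < -n3 := by omega
        rw [pv_A_eq, pv_B_eq n1 n2 n3 hn2 (-n3) (-1) (by rw [if_neg h3])]
        apply Finset.sum_congr rfl
        intro k _
        rw [pv_row n2 ((-1) * (1 + (k : Int))) (-n3) hm hn2']
        apply Finset.sum_congr rfl
        intro j _
        rw [show (((k : Int) + 1) * ((j : Int) + 1)) = -(-1 * (1 + (k:Int)) * ((j:Int) + 1)) by ring,
          ← PySem.Int.floordiv_neg_neg (-(-1 * (1 + (k:Int)) * ((j:Int) + 1))) n3]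
        rw [PySem.Int.floordiv_eq_ediv_of_pos hm]
        congr 1
        ring
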